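-- pv_equiv track=rewrite | github.com/hackingmath/Advent_of_Code_2021 | Day12.py | count_lowers
-- ===== SOURCE A (Python) =====
-- def count_lowers(arr):
--     """Counts each lowercase thing in arr,
--     if any are over 2, returns True."""
--     twos = 0
--     lowers = dict()
--     for thing in arr:
--         if thing not in ['start','end'] and thing.islower():
--             if thing not in lowers:
--                 lowers[thing] = 1
--             else:
--                 lowers[thing] += 1
--                 if lowers[thing] == 2:
--                     twos += 1
--                     if twos > 1:
--                         return True
--                 if lowers[thing] > 2:
--                     return True
--
--     return False
-- ===== SOURCE B (Python) =====
-- def count_lowers(arr):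
--     """Counts each lowercase thing in arr,
--     if any are over 2, returns True."""
--     interesting = [t for t in arr if t not in ('start', 'end') and t.islower()]
--     return len(interesting) - len(set(interesting)) >= 2
-- ===== Notes on version B (the rewrite author's own statement) =====
-- stated objective: simpler
-- what changed: Drops A's stateful single pass (per-cave count dict, 'twos' counter, threshold branches, early returns) for a staged closed form: filter the relevant lowercase items once, then return whether the total number of repeated occurrences, len(filtered) - len(set(filtered)), is at least 2.
import Mathlib
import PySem

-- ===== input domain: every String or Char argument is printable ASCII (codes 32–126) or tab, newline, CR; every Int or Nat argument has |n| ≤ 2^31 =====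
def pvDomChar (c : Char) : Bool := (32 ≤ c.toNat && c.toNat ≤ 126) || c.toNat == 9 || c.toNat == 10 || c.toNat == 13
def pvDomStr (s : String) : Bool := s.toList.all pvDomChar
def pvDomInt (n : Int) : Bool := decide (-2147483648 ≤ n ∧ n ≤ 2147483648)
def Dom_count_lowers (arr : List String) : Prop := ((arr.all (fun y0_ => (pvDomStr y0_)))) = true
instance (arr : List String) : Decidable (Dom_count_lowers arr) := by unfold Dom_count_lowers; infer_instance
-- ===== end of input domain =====

-- B replaces A's stateful early-return scan (per-cave count dict + 'twos' counter +
-- threshold branches) by a staged closed form: filter once, then compare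
-- len(filtered) - len(set(filtered)) >= 2 (the total number of repeated occurrences).

-- ===== PORT A =====
-- thing.islower(): some cased char and no uppercase char — exact on the printable-ASCII Dom,
-- where the cased characters are exactly the ASCII letters (ported by hand: no PySem str.islower)
def pyStrIslower (s : String) : Bool :=
  s.toList.any (fun c => PySem.Str.islower c) && s.toList.all (fun c => !PySem.Str.isupper c)

def countLowersLoopA : List String → Int → PySem.Dict String Int → Bool
  | [], _, _ => false
  | thing :: rest, twos, lowers =>
    if !(decide (thing ∈ ["start", "end"])) && pyStrIslower thing then
      if lowers.contains thing = false then
        countLowersLoopA rest twos (lowers.insert thing 1)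
      else
        let c := lowers.getD thing 0 + 1
        let lowers' := lowers.insert thing c
        let twos' := if c = 2 then twos + 1 else twos
        if c = 2 && decide (twos' > 1) then true
        else if c > 2 then true
        else countLowersLoopA rest twos' lowers'
    else countLowersLoopA rest twos lowers

def count_lowers (arr : List String) : Bool :=
  countLowersLoopA arr 0 PySem.Dict.empty

-- ===== PORT B =====
def count_lowers_alt (arr : List String) : Bool :=
  let interesting := arr.filter (fun t => !(decide (t ∈ ["start", "end"])) && pyStrIslower t)
  decide ((interesting.length : Int) - ((PySem.Set.ofList interesting).length : Int) ≥ 2)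

-- ===== PRECONDITION & SPEC =====
def Spec_count_lowers (arr : List String) (out : Bool) : Prop := out = count_lowers_alt arr
instance (arr : List String) (out : Bool) : Decidable (Spec_count_lowers arr out) := by unfold Spec_count_lowers; infer_instance

-- ===== CLAIM (what is proved, stated in full; the proofs are below) =====
def Claim_equal_count_lowers : Prop := ∀ (arr : List String), Dom_count_lowers arr → Spec_count_lowers arr (count_lowers arr)

-- ===== LEMMAS AND PROOFS =====

-- Proof bridge: an intermediate seen-set/repeat-counter loop, equal to A's loop
-- (loop invariant) and to B's closed form (counting argument).
def countLowersLoopM : List String → PySem.Set String → Int → Bool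
  | [], _, _ => false
  | thing :: rest, seen, repeats =>
    if !(decide (thing ∈ ["start", "end"])) && pyStrIslower thing then
      if PySem.Set.contains seen thing then
        if repeats + 1 > 1 then true else countLowersLoopM rest seen (repeats + 1)
      else countLowersLoopM rest (PySem.Set.add seen thing) repeats
    else countLowersLoopM rest seen repeats

-- Loop invariant: twos = repeats ∈ {0,1}, seen = dom lowers, every stored count is 1 or 2,
-- and while repeats = 0 every stored count is 1.
theorem loop_eq : ∀ (rest : List String) (repeats : Int) (lowers : PySem.Dict String Int)
    (seen : PySem.Set String),
    0 ≤ repeats → repeats ≤ 1 →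
    (∀ k, PySem.Set.contains seen k = lowers.contains k) →
    (∀ k v, lowers.get? k = some v → 1 ≤ v ∧ v ≤ 2 ∧ (repeats = 0 → v = 1)) →
    countLowersLoopA rest repeats lowers = countLowersLoopM rest seen repeats := by
  intro rest
  induction rest with
  | nil => intro _ _ _ _ _ _ _; rfl
  | cons thing rest ih =>
    intro repeats lowers seen h0 h1 hset hval
    simp only [countLowersLoopA, countLowersLoopM]
    by_cases hf : (!(decide (thing ∈ ["start", "end"])) && pyStrIslower thing) = true
    · rw [if_pos hf, if_pos hf]
      cases hc : lowers.contains thing with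
      | false =>
        have hsc : PySem.Set.contains seen thing = false := by rw [hset]; exact hc
        have hns : thing ∉ seen := by simpa [PySem.Set.contains] using hsc
        rw [if_pos rfl, if_neg (by simp [PySem.Set.contains, hns])]
        apply ih repeats _ _ h0 h1
        · intro k
          rw [PySem.Dict.contains_insert]
          have hs := hset k
          simp only [PySem.Set.contains] at hs ⊢
          by_cases hk : k = thing
          · subst hk; simp [PySem.Set.add, hns]
          · rw [show (k == thing) = false from by simp [hk], Bool.false_or, ← hs]
            simp [PySem.Set.add, hns, hk]
        · intro k v hkv
          rw [PySem.Dict.get?_insert] at hkv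
          by_cases hk : k = thing
          · rw [if_pos hk] at hkv
            injection hkv with hh; subst hh
            exact ⟨by norm_num, by norm_num, fun _ => rfl⟩
          · exact hval k v (by rwa [if_neg hk] at hkv)
      | true =>
        obtain ⟨v, hv⟩ := Option.isSome_iff_exists.mp
          (show (lowers.get? thing).isSome from by
            rw [← PySem.Dict.contains_eq_isSome_get?, hc])
        have hg : lowers.getD thing 0 = v := PySem.Dict.getD_of_get?_eq_some lowers 0 hv
        obtain ⟨hv1, hv2, hv0⟩ := hval thing v hv
        have hsc : PySem.Set.contains seen thing = true := by rw [hset]; exact hc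
        rw [if_neg (by simp), if_pos hsc]
        simp only [hg]
        by_cases hr : repeats = 0
        · -- no repeated cave yet: this is the first repeat, both sides continue
          have hveq : v = 1 := hv0 hr
          subst hveq hr
          norm_num
          apply ih 1 _ _ (by omega) (by omega)
          · intro k
            rw [PySem.Dict.contains_insert]
            by_cases hk : k = thing
            · subst hk; rw [hsc]; simp
            · rw [show (k == thing) = false from by simp [hk], Bool.false_or, ← hset k]
          · intro k v hkv
            rw [PySem.Dict.get?_insert] at hkv
            by_cases hk : k = thing
            · rw [if_pos hk] at hkv
              injection hkv with hh; subst hh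
              exact ⟨by norm_num, by norm_num, by norm_num⟩
            · obtain ⟨a, b, _⟩ := hval k v (by rwa [if_neg hk] at hkv)
              exact ⟨a, b, by norm_num⟩
        · -- a repeat already happened: this second repeat makes both sides return True
          have hr1 : repeats = 1 := by omega
          subst hr1
          have hv12 : v = 1 ∨ v = 2 := by omega
          rcases hv12 with h | h <;> subst h <;> norm_num
    · rw [if_neg hf, if_neg hf]
      exact ih repeats lowers seen h0 h1 hset hval

-- set.update adds at most one element per item
theorem update_length_le (l : List String) : ∀ (s : PySem.Set String),
    (PySem.Set.update s l).length ≤ s.length + l.length := by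
  induction l with
  | nil => intro s; simp [PySem.Set.update]
  | cons a l ih =>
    intro s
    rw [PySem.Set.update_cons]
    have h := ih (PySem.Set.add s a)
    have : (PySem.Set.add s a).length ≤ s.length + 1 := by
      by_cases hm : a ∈ s
      · rw [PySem.Set.add_of_mem hm]; omega
      · rw [PySem.Set.add_of_not_mem hm]; simp
    simp only [List.length_cons]
    omega

-- the middle loop computes the closed form: repeats + (# filtered elements that are
-- duplicates relative to seen) ≥ 2
theorem loopM_closed : ∀ (rest : List String) (seen : PySem.Set String) (r : Int),
    0 ≤ r → r ≤ 1 →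
    countLowersLoopM rest seen r =
      decide (r + ((rest.filter (fun t => !(decide (t ∈ ["start", "end"])) && pyStrIslower t)).length : Int)
        + (seen.length : Int)
        - ((PySem.Set.update seen (rest.filter (fun t => !(decide (t ∈ ["start", "end"])) && pyStrIslower t))).length : Int) ≥ 2) := by
  intro rest
  induction rest with
  | nil =>
    intro seen r h0 h1
    simp only [countLowersLoopM, List.filter_nil,
      show PySem.Set.update seen [] = seen from rfl, List.length_nil]
    rw [eq_comm, decide_eq_false_iff_not]
    push_cast
    omega
  | cons thing rest ih =>
    intro seen r h0 h1
    simp only [countLowersLoopM]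
    by_cases hf : (!(decide (thing ∈ ["start", "end"])) && pyStrIslower thing) = true
    · rw [if_pos hf]
      simp only [List.filter_cons, hf, if_true]
      by_cases hm : thing ∈ seen
      · have hsc : PySem.Set.contains seen thing = true := by
          rw [PySem.Set.contains_iff]; exact hm
        rw [if_pos hsc, PySem.Set.update_cons, PySem.Set.add_of_mem hm]
        by_cases hr : r = 0
        · subst hr
          rw [if_neg (by omega)]
          rw [show (0:Int) + 1 = 1 from rfl, ih seen 1 (by omega) (by omega)]
          simp only [List.length_cons]
          rw [decide_eq_decide]
          push_cast
          omega
        · have hr1 : r = 1 := by omega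
          subst hr1
          rw [if_pos (by omega), eq_comm, decide_eq_true_iff]
          have hb := update_length_le
            (rest.filter (fun t => !(decide (t ∈ ["start", "end"])) && pyStrIslower t)) seen
          simp only [List.length_cons]
          push_cast
          omega
      · have hsc : PySem.Set.contains seen thing = false := by
          rw [← Bool.not_eq_true, PySem.Set.contains_iff]; exact hm
        rw [if_neg (by rw [hsc]; simp), PySem.Set.update_cons]
        rw [ih (PySem.Set.add seen thing) r h0 h1]
        rw [PySem.Set.add_of_not_mem hm]
        simp only [List.length_cons, List.length_append, List.length_cons, List.length_nil]
        rw [decide_eq_decide]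
        push_cast
        omega
    · rw [if_neg hf]
      simp only [List.filter_cons, hf, if_false, Bool.false_eq_true]
      exact ih seen r h0 h1

-- ===== VERDICT (by name: the statement is the Claim_ definition above) =====
theorem count_lowers_spec : Claim_equal_count_lowers := by
  intro arr _
  unfold Spec_count_lowers count_lowers count_lowers_alt
  rw [loop_eq arr 0 PySem.Dict.empty PySem.Set.empty (by omega) (by omega)
    (fun k => by simp [PySem.Set.contains, PySem.Set.empty, PySem.Dict.contains_empty])
    (fun k v h => by simp [PySem.Dict.get?_empty] at h)]
  rw [loopM_closed arr PySem.Set.empty 0 (by omega) (by omega)]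
  simp only [show ∀ l : List String, PySem.Set.update PySem.Set.empty l = PySem.Set.ofList l
      from fun l => PySem.Set.update_nil_left _]
  rw [decide_eq_decide]
  simp only [PySem.Set.empty, List.length_nil]
  push_cast
  omega
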